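-- pv_equiv track=rewrite | github.com/tsigemit/Python_Script | final-assignment/Final_Assignment_For_VG.py | update_predicted_lexicon
-- ===== SOURCE A (Python) =====
-- def update_predicted_lexicon(doc, model):
--     """ "
--     This function updates the model's bias and polarity of each word in the document.
--
--     This function checks if a word is in the lex or not.
--     If it is on the lex, 1 is subtracted from the the polarity of the word.
--     Otherwise, the polarity of the word is initialized to -1
--     Args:
--          doc: the document which contains the words to be updated their polarity on the lex.
--          model: a submodel that passes from the train function which has three elements
--                 model[0]: name of the genre
--                 model[1]: bias number
--                 model[2]: a dictionary having words as keys and their polarity as values.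
--     Returns:
--            This function returns the model with updated lexicon and bias.
--     """
--     bias = model[1]
--     for word in doc:
--         if word in model[2]:
--             model[2][word] -= 1
--         else:
--             model[2][word] = 1
--     return (model[0], bias-1, model[2])
-- ===== SOURCE B (Python) =====
-- def update_predicted_lexicon(doc, model):
--     counts = {}
--     for w in doc:
--         counts[w] = counts.get(w, 0) + 1
--     lex = {k: v - counts.get(k, 0) for k, v in model[2].items()}
--     for w, c in counts.items():
--         if w not in lex:
--             lex[w] = 2 - c
--     return (model[0], model[1] - 1, lex)
-- ===== Notes on version B (the rewrite author's own statement) =====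
-- stated objective: alternative
-- what changed: Instead of mutating the lexicon once per occurrence, B builds a frequency table of doc and reconstructs the lexicon in one shot: a comprehension subtracts each existing word's count from its old polarity, then new words are appended in first-occurrence order with polarity 2-count; Pre_ excludes association lists with duplicate keys, which cannot arise from a Python dict; B also returns a fresh dict instead of mutating model[2] in place.
import Mathlib
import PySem

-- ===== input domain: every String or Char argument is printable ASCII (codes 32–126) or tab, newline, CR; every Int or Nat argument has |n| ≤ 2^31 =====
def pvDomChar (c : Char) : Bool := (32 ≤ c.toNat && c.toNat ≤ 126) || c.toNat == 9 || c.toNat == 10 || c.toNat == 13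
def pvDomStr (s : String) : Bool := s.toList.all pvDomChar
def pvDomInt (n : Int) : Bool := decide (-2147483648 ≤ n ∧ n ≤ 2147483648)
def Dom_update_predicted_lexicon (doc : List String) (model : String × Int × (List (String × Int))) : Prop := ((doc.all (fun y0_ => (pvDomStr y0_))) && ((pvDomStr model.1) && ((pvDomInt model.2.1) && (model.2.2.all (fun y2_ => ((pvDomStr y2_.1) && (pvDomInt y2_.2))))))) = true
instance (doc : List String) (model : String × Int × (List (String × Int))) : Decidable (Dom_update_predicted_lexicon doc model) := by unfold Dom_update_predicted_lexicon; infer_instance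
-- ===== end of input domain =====

-- B builds a frequency table of doc and reconstructs the lexicon in one shot (map over the
-- existing items, then append the new words) instead of A's per-occurrence dict mutation.
-- In Python, A mutates model[2] in place and returns it, while B returns a fresh dict: the
-- equivalence proved here is about the RETURN value only.

-- ===== PORT A =====
-- the body of A's for-loop: if word in lex: lex[word] -= 1 else: lex[word] = 1
def pvStepA (d : PySem.Dict String Int) (word : String) : PySem.Dict String Int :=
  if d.contains word then d.insert word (d.getD word 0 - 1) else d.insert word 1

def update_predicted_lexicon (doc : List String) (model : String × Int × (List (String × Int))) : String × Int × (List (String × Int)) :=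
  let bias := model.2.1
  let lex := doc.foldl pvStepA (PySem.Dict.mk model.2.2)
  (model.1, bias - 1, lex.items)

-- ===== PORT B =====
-- the body of B's second loop: if w not in lex: lex[w] = 2 - c
def pvAddNew (d : PySem.Dict String Int) (p : String × Int) : PySem.Dict String Int :=
  if d.contains p.1 then d else d.insert p.1 (2 - p.2)

def update_predicted_lexicon_alt (doc : List String) (model : String × Int × (List (String × Int))) : String × Int × (List (String × Int)) :=
  let counts := doc.foldl (fun c w => c.insert w (c.getD w 0 + 1)) PySem.Dict.empty
  let lex := PySem.Dict.mk ((PySem.Dict.mk model.2.2).items.map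
    (fun p => (p.1, p.2 - counts.getD p.1 0)))
  let lex2 := counts.items.foldl pvAddNew lex
  (model.1, model.2.1 - 1, lex2.items)

-- ===== PRECONDITION & SPEC =====
-- Pre_ excludes association lists with duplicate keys: they cannot arise from a Python dict
-- (model[2] is a dict), so they represent no Python input of A.
def Pre_update_predicted_lexicon (doc : List String) (model : String × Int × (List (String × Int))) : Prop :=
  (model.2.2.map Prod.fst).Nodup
instance (doc : List String) (model : String × Int × (List (String × Int))) : Decidable (Pre_update_predicted_lexicon doc model) := by unfold Pre_update_predicted_lexicon; infer_instance

def pvWitness_update_predicted_lexicon : List String × (String × Int × (List (String × Int))) :=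
  (["a", "b", "a"], ("g", 3, [("a", 1), ("c", -2)]))

def Spec_update_predicted_lexicon (doc : List String) (model : String × Int × (List (String × Int))) (out : String × Int × (List (String × Int))) : Prop := out = update_predicted_lexicon_alt doc model
instance (doc : List String) (model : String × Int × (List (String × Int))) (out : String × Int × (List (String × Int))) : Decidable (Spec_update_predicted_lexicon doc model out) := by unfold Spec_update_predicted_lexicon; infer_instance

-- ===== CLAIM (what is proved, stated in full; the proofs are below) =====
def Claim_equal_update_predicted_lexicon : Prop := ∀ (doc : List String) (model : String × Int × (List (String × Int))), Dom_update_predicted_lexicon doc model → Pre_update_predicted_lexicon doc model → Spec_update_predicted_lexicon doc model (update_predicted_lexicon doc model)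

-- ===== LEMMAS AND PROOFS =====

-- B's grouped-update step on a Counter pair: if word in lex: lex[word] -= c else: lex[word] = 2 - c
-- (only used by the proofs, as the intermediate form A's pass is reduced to)
def pvStepB (d : PySem.Dict String Int) (p : String × Int) : PySem.Dict String Int :=
  if d.contains p.1 then d.insert p.1 (d.getD p.1 0 - p.2) else d.insert p.1 (2 - p.2)

-- the count an association list assigns to a key (0 when absent); for a Dict d this is d.getD k 0
def pvCnt (l : List (String × Int)) (k : String) : Int :=
  ((l.find? (fun p => p.1 == k)).map Prod.snd).getD 0

-- two overwriting inserts at distinct keys commute when the left key is already present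
theorem pv_insert_comm (d : PySem.Dict String Int) (k1 k2 : String) (v1 v2 : Int)
    (hne : k2 ≠ k1) (h1 : d.contains k1 = true) :
    (d.insert k1 v1).insert k2 v2 = (d.insert k2 v2).insert k1 v1 := by
  apply PySem.Dict.ext
  by_cases h2 : d.contains k2 = true
  · rw [PySem.Dict.items_insert, PySem.Dict.items_insert d k1 v1,
        PySem.Dict.items_insert, PySem.Dict.items_insert d k2 v2]
    simp only [PySem.Dict.contains_insert, h1, h2, Bool.or_true, if_pos, List.map_map]
    apply List.map_congr_left
    intro p _
    by_cases hp1 : p.1 = k1 <;> by_cases hp2 : p.1 = k2 <;>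
      simp_all [beq_iff_eq]
  · have h2' : d.contains k2 = false := by simp_all
    rw [PySem.Dict.items_insert, PySem.Dict.items_insert d k1 v1,
        PySem.Dict.items_insert, PySem.Dict.items_insert d k2 v2]
    simp only [PySem.Dict.contains_insert, h1, h2', Bool.or_true, Bool.or_false,
      beq_iff_eq, hne, if_pos]
    simp [List.map_append, hne]

-- A's step at w commutes past B's step at any other key, once w is present
theorem pv_step_comm (d : PySem.Dict String Int) (w : String) (p : String × Int)
    (hne : p.1 ≠ w) (hw : d.contains w = true) :
    pvStepB (pvStepA d w) p = pvStepA (pvStepB d p) w := by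
  unfold pvStepA pvStepB
  rw [if_pos hw]
  have hcp : (d.insert w (d.getD w 0 - 1)).contains p.1 = d.contains p.1 := by
    simp [PySem.Dict.contains_insert, hne]
  have hgp : (d.insert w (d.getD w 0 - 1)).getD p.1 0 = d.getD p.1 0 :=
    PySem.Dict.getD_insert_of_ne d _ _ hne
  have hcw : ∀ v : Int, (d.insert p.1 v).contains w = true := by
    intro v; simp [PySem.Dict.contains_insert, hw]
  have hgw : ∀ v : Int, (d.insert p.1 v).getD w 0 = d.getD w 0 :=
    fun v => PySem.Dict.getD_insert_of_ne d _ _ (Ne.symm hne)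
  by_cases hk : d.contains p.1 = true
  · rw [if_pos (hcp.trans hk), if_pos hk, hgp, if_pos (hcw _), hgw]
    exact pv_insert_comm d w p.1 _ _ hne hw
  · have hk' : d.contains p.1 = false := by simp_all
    rw [if_neg hk,
        if_neg (show ¬((d.insert w (d.getD w 0 - 1)).contains p.1 = true) by simp [hcp, hk']),
        if_pos (hcw _), hgw]
    exact pv_insert_comm d w p.1 _ _ hne hw

theorem pv_fold_comm (l : List (String × Int)) (d : PySem.Dict String Int) (w : String)
    (hl : ∀ p ∈ l, p.1 ≠ w) (hw : d.contains w = true) :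
    l.foldl pvStepB (pvStepA d w) = pvStepA (l.foldl pvStepB d) w := by
  induction l generalizing d with
  | nil => rfl
  | cons p l ih =>
    simp only [List.foldl_cons]
    rw [pv_step_comm d w p (hl p (by simp)) hw]
    apply ih _ (fun q hq => hl q (by simp [hq]))
    unfold pvStepB
    split <;> simp [PySem.Dict.contains_insert, hw]

-- one more occurrence of w is one more A-step after the grouped B-step
theorem pv_stepB_succ (d : PySem.Dict String Int) (w : String) (c : Int) :
    pvStepB d (w, c + 1) = pvStepA (pvStepB d (w, c)) w := by
  unfold pvStepA pvStepB
  by_cases hk : d.contains w = true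
  · simp only [hk, if_pos, PySem.Dict.contains_insert_self,
      PySem.Dict.getD_insert_self, PySem.Dict.insert_insert_self]
    ring_nf
  · have hk' : d.contains w = false := by simp_all
    simp [hk', PySem.Dict.contains_insert_self,
      PySem.Dict.getD_insert_self, PySem.Dict.insert_insert_self]
    ring_nf

theorem pv_map_no_key (l : List (String × Int)) (w : String) (v : Int)
    (h : w ∉ l.map Prod.fst) :
    l.map (fun p => if p.1 == w then (w, v) else p) = l := by
  induction l with
  | nil => rfl
  | cons p l ih =>
    simp only [List.map] at h ⊢
    have h1 : p.1 ≠ w := fun hh => h (by simp [hh])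
    rw [if_neg (by simp [h1]), ih (fun hh => h (by simp [hh]))]

-- A's per-occurrence pass equals the grouped pvStepB pass over Counter items
theorem pv_main (xs : List String) (d : PySem.Dict String Int) :
    xs.foldl pvStepA d = ((PySem.Dict.counter xs).items).foldl pvStepB d := by
  induction xs using List.reverseRecOn with
  | nil => rfl
  | append_singleton xs w ih =>
    rw [List.foldl_append, List.foldl_cons, List.foldl_nil, ih,
        PySem.Dict.counter_append_singleton]
    by_cases hw : (PySem.Dict.counter xs).contains w = true
    · obtain ⟨c, hc⟩ : ∃ c, (PySem.Dict.counter xs).get? w = some c := by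
        have := PySem.Dict.contains_eq_isSome_get? (PySem.Dict.counter xs) w
        rw [hw] at this
        exact Option.isSome_iff_exists.mp this.symm
      have hgD : (PySem.Dict.counter xs).getD w 0 = c := PySem.Dict.getD_of_get?_eq_some _ _ hc
      have hmem : (w, c) ∈ (PySem.Dict.counter xs).items :=
        PySem.Dict.mem_items_of_get?_eq_some _ hc
      obtain ⟨pre, post, hsplit⟩ := List.append_of_mem hmem
      have hnd : ((PySem.Dict.counter xs).items.map Prod.fst).Nodup :=
        PySem.Dict.nodup_keys_counter xs
      rw [hsplit] at hnd
      simp only [List.map_append, List.map_cons, List.nodup_append, List.nodup_cons] at hnd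
      have hpre : w ∉ pre.map Prod.fst := fun hh => hnd.2.2 w hh w (by simp) rfl
      have hpost : w ∉ post.map Prod.fst := hnd.2.1.1
      have hitems : ((PySem.Dict.counter xs).modify w 0 (· + 1)).items
          = pre ++ (w, c + 1) :: post := by
        show ((PySem.Dict.counter xs).insert w ((PySem.Dict.counter xs).getD w 0 + 1)).items = _
        rw [PySem.Dict.items_insert, if_pos hw, hgD, hsplit]
        rw [List.map_append, List.map_cons]
        rw [pv_map_no_key pre w (c+1) hpre, pv_map_no_key post w (c+1) hpost]
        simp
      rw [hitems, hsplit, List.foldl_append, List.foldl_append, List.foldl_cons,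
          List.foldl_cons, pv_stepB_succ]
      refine (pv_fold_comm post _ w (fun p hp => by
        intro hh; exact hpost (by rw [← hh]; exact List.mem_map_of_mem hp)) ?_).symm
      unfold pvStepB
      split <;> exact PySem.Dict.contains_insert_self _ _ _
    · have hw' : (PySem.Dict.counter xs).contains w = false := by simp_all
      have hitems : ((PySem.Dict.counter xs).modify w 0 (· + 1)).items
          = (PySem.Dict.counter xs).items ++ [(w, 1)] := by
        show ((PySem.Dict.counter xs).insert w ((PySem.Dict.counter xs).getD w 0 + 1)).items = _
        rw [PySem.Dict.items_insert, if_neg (by simp [hw']),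
            PySem.Dict.getD_of_not_contains _ _ hw']
        norm_num
      rw [hitems, List.foldl_append, List.foldl_cons, List.foldl_nil]
      unfold pvStepA pvStepB
      norm_num

-- pvCnt facts: the count of a key in an association list
theorem pvCnt_nil (k : String) : pvCnt [] k = 0 := rfl

theorem pvCnt_cons_self (p : String × Int) (l : List (String × Int)) :
    pvCnt (p :: l) p.1 = p.2 := by simp [pvCnt]

theorem pvCnt_cons_ne (p : String × Int) (l : List (String × Int)) (k : String)
    (h : k ≠ p.1) : pvCnt (p :: l) k = pvCnt l k := by
  simp [pvCnt, beq_iff_eq, h.symm]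

theorem pvCnt_eq_zero (l : List (String × Int)) (k : String)
    (h : k ∉ l.map Prod.fst) : pvCnt l k = 0 := by
  have : l.find? (fun p => p.1 == k) = none := by
    rw [List.find?_eq_none]
    intro q hq
    simp only [beq_iff_eq]
    exact fun hh => h (hh ▸ List.mem_map_of_mem hq)
  simp [pvCnt, this]

-- the grouped pvStepB pass, in closed form: subtract the count from every existing entry,
-- then append the new keys (in l's order) with value 2 - count
theorem pv_L1 (l : List (String × Int)) (d : PySem.Dict String Int)
    (hl : (l.map Prod.fst).Nodup) (hd : d.keys.Nodup) :
    (l.foldl pvStepB d).items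
      = d.items.map (fun p => (p.1, p.2 - pvCnt l p.1))
        ++ (l.filter (fun p => !d.contains p.1)).map (fun p => (p.1, 2 - p.2)) := by
  induction l generalizing d with
  | nil => simp [pvCnt_nil]
  | cons p l ih =>
    simp only [List.map_cons, List.nodup_cons] at hl
    have hne : ∀ q ∈ l, q.1 ≠ p.1 := fun q hq hh => hl.1 (hh ▸ List.mem_map_of_mem hq)
    have hcl0 : pvCnt l p.1 = 0 := pvCnt_eq_zero l p.1 hl.1
    simp only [List.foldl_cons, List.filter_cons]
    by_cases hc : d.contains p.1 = true
    · have hstep : pvStepB d p = d.insert p.1 (d.getD p.1 0 - p.2) := by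
        unfold pvStepB; rw [if_pos hc]
      have hd' : (d.insert p.1 (d.getD p.1 0 - p.2)).keys.Nodup :=
        PySem.Dict.nodup_keys_insert d _ _ hd
      rw [hstep, ih _ hl.2 hd']
      have hmap : (d.insert p.1 (d.getD p.1 0 - p.2)).items.map (fun q => (q.1, q.2 - pvCnt l q.1))
          = d.items.map (fun q => (q.1, q.2 - pvCnt (p :: l) q.1)) := by
        rw [PySem.Dict.items_insert_of_contains d _ hc, List.map_map]
        apply List.map_congr_left
        intro q hq
        by_cases hqp : q.1 = p.1
        · have hqmem : (p.1, q.2) ∈ d.items := by rw [← hqp]; exact hq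
          have hgd : d.getD p.1 0 = q.2 := PySem.Dict.getD_of_mem_items d hqmem hd 0
          simp only [Function.comp_apply, hqp, beq_self_eq_true, if_pos, hgd, hcl0,
            pvCnt_cons_self]
          ring_nf
        · simp only [Function.comp_apply, beq_iff_eq, hqp, if_false,
            pvCnt_cons_ne p l q.1 hqp]
      have hfc : l.filter (fun q => !(d.insert p.1 (d.getD p.1 0 - p.2)).contains q.1)
          = l.filter (fun q => !d.contains q.1) := by
        apply List.filter_congr
        intro q hq
        simp [PySem.Dict.contains_insert, hne q hq]
      rw [hmap, hfc]
      simp [hc]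
    · have hc' : d.contains p.1 = false := by simp_all
      have hnk : p.1 ∉ d.keys := by
        intro hh
        rw [(PySem.Dict.contains_iff_mem_keys d p.1).mpr hh] at hc'
        simp at hc'
      have hne_d : ∀ q ∈ d.items, q.1 ≠ p.1 := fun q hq hh =>
        hnk (hh ▸ List.mem_map_of_mem hq)
      have hstep : pvStepB d p = d.insert p.1 (2 - p.2) := by
        unfold pvStepB; rw [if_neg (by simp [hc'])]
      have hd' : (d.insert p.1 (2 - p.2)).keys.Nodup :=
        PySem.Dict.nodup_keys_insert d _ _ hd
      rw [hstep, ih _ hl.2 hd',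
          PySem.Dict.items_insert_of_not_contains d _ hc', List.map_append]
      have hmap : d.items.map (fun q => (q.1, q.2 - pvCnt l q.1))
          = d.items.map (fun q => (q.1, q.2 - pvCnt (p :: l) q.1)) := by
        apply List.map_congr_left
        intro q hq
        rw [pvCnt_cons_ne p l q.1 (hne_d q hq)]
      have hfc : l.filter (fun q => !(d.insert p.1 (2 - p.2)).contains q.1)
          = l.filter (fun q => !d.contains q.1) := by
        apply List.filter_congr
        intro q hq
        simp [PySem.Dict.contains_insert, hne q hq]
      rw [hmap, hfc]
      simp [hc', hcl0, List.append_assoc]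

-- B's append-new pass in closed form
theorem pv_L2 (l : List (String × Int)) (e : PySem.Dict String Int)
    (hl : (l.map Prod.fst).Nodup) :
    (l.foldl pvAddNew e).items
      = e.items ++ (l.filter (fun p => !e.contains p.1)).map (fun p => (p.1, 2 - p.2)) := by
  induction l generalizing e with
  | nil => simp
  | cons p l ih =>
    simp only [List.map_cons, List.nodup_cons] at hl
    have hne : ∀ q ∈ l, q.1 ≠ p.1 := fun q hq hh => hl.1 (hh ▸ List.mem_map_of_mem hq)
    simp only [List.foldl_cons, List.filter_cons]
    by_cases hc : e.contains p.1 = true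
    · have hstep : pvAddNew e p = e := by unfold pvAddNew; rw [if_pos hc]
      rw [hstep, ih e hl.2]
      simp [hc]
    · have hc' : e.contains p.1 = false := by simp_all
      have hstep : pvAddNew e p = e.insert p.1 (2 - p.2) := by
        unfold pvAddNew; rw [if_neg (by simp [hc'])]
      rw [hstep, ih _ hl.2, PySem.Dict.items_insert_of_not_contains _ _ hc']
      have hfc : l.filter (fun q => !(e.insert p.1 (2 - p.2)).contains q.1)
          = l.filter (fun q => !e.contains q.1) := by
        apply List.filter_congr
        intro q hq
        simp [PySem.Dict.contains_insert, hne q hq]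
      rw [hfc]
      simp [hc']

-- ===== VERDICT (by name: the statement is the Claim_ definition above) =====
theorem update_predicted_lexicon_spec : Claim_equal_update_predicted_lexicon := by
  intro doc model _ hpre
  unfold Spec_update_predicted_lexicon
  unfold update_predicted_lexicon update_predicted_lexicon_alt
  have hcounts : doc.foldl (fun c w => c.insert w (c.getD w 0 + 1)) PySem.Dict.empty
      = PySem.Dict.counter doc := rfl
  have hd : (PySem.Dict.mk model.2.2).keys.Nodup := hpre
  have hlc : ((PySem.Dict.counter doc).items.map Prod.fst).Nodup :=
    PySem.Dict.nodup_keys_counter doc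
  have hlex_items : (PySem.Dict.mk ((PySem.Dict.mk model.2.2).items.map
      (fun p => (p.1, p.2 - (PySem.Dict.counter doc).getD p.1 0)))).items
      = (PySem.Dict.mk model.2.2).items.map
        (fun p => (p.1, p.2 - pvCnt (PySem.Dict.counter doc).items p.1)) := rfl
  have hlex_contains : ∀ x, (PySem.Dict.mk ((PySem.Dict.mk model.2.2).items.map
      (fun p => (p.1, p.2 - (PySem.Dict.counter doc).getD p.1 0)))).contains x
      = (PySem.Dict.mk model.2.2).contains x := by
    intro x
    simp [PySem.Dict.contains, List.any_map, Function.comp_def]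
  simp only [hcounts]
  refine congrArg (fun z => (model.1, model.2.1 - 1, z)) ?_
  rw [pv_main doc (PySem.Dict.mk model.2.2), pv_L1 _ _ hlc hd,
      pv_L2 _ _ hlc, hlex_items]
  refine congrArg _ (congrArg _ (List.filter_congr ?_))
  intro q _
  rw [hlex_contains q.1]
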